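-- pv_equiv track=rewrite | github.com/yaya-sy/mwe-extraction | src/baseline/evaluation.py | __regroupe_mots_composes
-- ===== SOURCE A (Python) =====
-- def __regroupe_mots_composes(tags: list) :
--   """
--   Fonction qui regrouppe les mots composés en liste.
--   Pour une entrée comme [B_DET, B_NOUN, I_DET, I_NOUN, B_VERB], va renvoyer [[B_DET], [B_NOUN, I_DET, I_NOUN], [B_VERB]]
--   """
--   l = len(tags)
--   liste = []
--   i = 0
--   while i <= l - 1 :
--     inside = [tags[i]]
--     j = i + 1
--     find = True
--     while find :
--       if j < l and "I_" in tags[j] :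
--         inside.append(tags[j])
--       else :
--         find = False
--       j += 1
--     i = j - 1
--     liste.append(inside)
--   return liste
-- ===== SOURCE B (Python) =====
-- def __regroupe_mots_composes(tags: list):
--     """Single flat pass: an 'I_' tag joins the latest group when one exists, otherwise a tag opens a new group."""
--     liste = []
--     for tag in tags:
--         if "I_" in tag and liste:
--             liste[-1].append(tag)
--         else:
--             liste.append([tag])
--     return liste
-- ===== Notes on version B (the rewrite author's own statement) =====
-- stated objective: simpler
-- what changed: Replaces the nested while-loops with index bookkeeping (inner scan absorbing I_ tags, i = j - 1 rewind) by a single flat for-loop that appends each tag to the last group when it contains 'I_' and a group already exists, else opens a new group.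
import Mathlib
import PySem

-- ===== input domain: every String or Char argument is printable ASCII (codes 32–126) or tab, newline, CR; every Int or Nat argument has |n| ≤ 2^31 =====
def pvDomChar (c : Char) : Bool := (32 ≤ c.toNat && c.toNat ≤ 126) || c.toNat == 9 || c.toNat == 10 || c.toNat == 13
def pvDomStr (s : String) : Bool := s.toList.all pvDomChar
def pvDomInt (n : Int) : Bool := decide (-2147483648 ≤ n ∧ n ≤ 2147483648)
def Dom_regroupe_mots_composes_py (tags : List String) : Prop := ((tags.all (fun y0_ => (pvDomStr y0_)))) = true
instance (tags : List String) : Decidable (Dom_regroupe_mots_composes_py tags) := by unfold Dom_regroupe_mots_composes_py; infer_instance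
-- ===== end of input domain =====

-- B replaces A's nested boundary-scanning while-loops by one flat pass appending to the last group; objective: simpler.

-- ===== PORT A =====
-- A's loops only move forward through `tags` (the inner `while find` advances j over tags[i+1:],
-- and `i = j - 1` resumes the outer loop exactly at the first tag the inner loop did not consume),
-- so both loops are ported over list suffixes: the inner loop takes the suffix tags[i+1:] and
-- returns (inside, unconsumed suffix) — the pair Python holds as (inside, j).

-- inner `while find` loop of A: `if j < l and "I_" in tags[j]: inside.append(tags[j])` over the suffix
def pvInnerA : List String → List String → List String × List String
  | [], inside => (inside, [])
  | u :: rest, inside =>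
      if PySem.Str.isIn "I_" u then pvInnerA rest (inside ++ [u])
      else (inside, u :: rest)

-- the inner loop never lengthens the suffix (termination of the outer loop)
theorem pvInnerA_len : ∀ (l inside : List String), (pvInnerA l inside).2.length ≤ l.length := by
  intro l
  induction l with
  | nil => intro inside; simp [pvInnerA]
  | cons u rest ih =>
      intro inside
      rw [pvInnerA]
      cases hu : PySem.Str.isIn "I_" u with
      | true => rw [if_pos rfl]; exact Nat.le_succ_of_le (ih (inside ++ [u]))
      | false => rw [if_neg (by simp)]

-- outer `while i <= l - 1` loop of A: `inside = [tags[i]]`, run the inner loop, append `inside`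
def pvOuterA (l : List String) (liste : List (List String)) : List (List String) :=
  match l with
  | [] => liste
  | t :: rest =>
      let res := pvInnerA rest [t]
      pvOuterA res.2 (liste ++ [res.1])
termination_by l.length
decreasing_by exact Nat.lt_succ_of_le (pvInnerA_len rest [t])

def regroupe_mots_composes_py (tags : List String) : List (List String) :=
  pvOuterA tags []

-- ===== PORT B =====
def regroupe_mots_composes_py_alt (tags : List String) : List (List String) :=
  tags.foldl
    (fun liste tag =>
      if PySem.Str.isIn "I_" tag && !liste.isEmpty then
        liste.dropLast ++ [liste.getLastD [] ++ [tag]]   -- liste[-1].append(tag)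
      else
        liste ++ [[tag]])
    []

-- ===== PRECONDITION & SPEC =====
def Spec_regroupe_mots_composes_py (tags : List String) (out : List (List String)) : Prop := out = regroupe_mots_composes_py_alt tags
instance (tags : List String) (out : List (List String)) : Decidable (Spec_regroupe_mots_composes_py tags out) := by unfold Spec_regroupe_mots_composes_py; infer_instance

-- ===== CLAIM (what is proved, stated in full; the proofs are below) =====
def Claim_equal_regroupe_mots_composes_py : Prop := ∀ (tags : List String), Dom_regroupe_mots_composes_py tags → Spec_regroupe_mots_composes_py tags (regroupe_mots_composes_py tags)

-- ===== LEMMAS AND PROOFS =====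

-- the common description of both programs: a group is a tag followed by the run of "I_" tags after it
def pvGrp : List String → List (List String)
  | [] => []
  | t :: rest =>
      (t :: rest.takeWhile (PySem.Str.isIn "I_")) ::
        pvGrp (rest.dropWhile (PySem.Str.isIn "I_"))
termination_by l => l.length
decreasing_by
  have := List.length_dropWhile_le (p := (PySem.Str.isIn "I_")) (l := rest)
  simpa using Nat.lt_succ_of_le this

theorem pvInnerA_eq : ∀ (l inside : List String),
    pvInnerA l inside =
      (inside ++ l.takeWhile (PySem.Str.isIn "I_"), l.dropWhile (PySem.Str.isIn "I_")) := by
  intro l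
  induction l with
  | nil => intro inside; simp [pvInnerA]
  | cons u rest ih =>
      intro inside
      rw [pvInnerA]
      cases hu : PySem.Str.isIn "I_" u with
      | true =>
          rw [if_pos rfl, ih (inside ++ [u]), List.takeWhile_cons_of_pos hu,
              List.dropWhile_cons_of_pos hu, List.append_assoc, List.singleton_append]
      | false =>
          have hu' : ¬ ((PySem.Str.isIn "I_") u = true) := by rw [hu]; exact Bool.false_ne_true
          rw [if_neg (by simp), List.takeWhile_cons_of_neg hu',
              List.dropWhile_cons_of_neg hu']
          simp

theorem pvOuterA_eq (l : List String) (liste : List (List String)) :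
    pvOuterA l liste = liste ++ pvGrp l := by
  fun_induction pvOuterA l liste with
  | case1 liste => rw [pvGrp]; simp
  | case2 liste t rest res ih =>
      have hres : res = pvInnerA rest [t] := rfl
      rw [pvInnerA_eq] at hres
      rw [ih, hres]
      dsimp only
      rw [pvGrp, List.singleton_append, List.append_assoc, List.singleton_append]

theorem pv_dropWhile_head_false {α : Type} (p : α → Bool) (l : List α) (r : α) (rest' : List α)
    (h : l.dropWhile p = r :: rest') : p r = false := by
  induction l with
  | nil => simp at h
  | cons a l ih =>
      cases ha : p a with
      | true => rw [List.dropWhile_cons_of_pos ha] at h; exact ih h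
      | false =>
          rw [List.dropWhile_cons_of_neg (by simp [ha])] at h
          injection h with h1 h2
          subst h1
          exact ha

-- abbreviation for B's folded step function
def pvStep (liste : List (List String)) (tag : String) : List (List String) :=
  if PySem.Str.isIn "I_" tag && !liste.isEmpty then
    liste.dropLast ++ [liste.getLastD [] ++ [tag]]
  else
    liste ++ [[tag]]

theorem pvStep_nil (tag : String) : pvStep [] tag = [[tag]] := by
  simp [pvStep]

theorem pvStep_pos (acc : List (List String)) (g : List String) (tag : String)
    (h : PySem.Str.isIn "I_" tag = true) : pvStep (acc ++ [g]) tag = acc ++ [g ++ [tag]] := by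
  simp only [pvStep, h, Bool.true_and]
  simp

theorem pvStep_neg (liste : List (List String)) (tag : String)
    (h : PySem.Str.isIn "I_" tag = false) : pvStep liste tag = liste ++ [[tag]] := by
  simp only [pvStep, h, Bool.false_and]
  simp

theorem pvStep_run (w : List String) (hw : ∀ t ∈ w, PySem.Str.isIn "I_" t = true) :
    ∀ (rest : List String) (acc : List (List String)) (g : List String),
      List.foldl pvStep (acc ++ [g]) (w ++ rest) = List.foldl pvStep (acc ++ [g ++ w]) rest := by
  induction w with
  | nil => intro rest acc g; simp
  | cons t w' ih =>
      intro rest acc g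
      have ht : PySem.Str.isIn "I_" t = true := hw t (by simp)
      simp only [List.cons_append, List.foldl_cons, pvStep_pos acc g t ht]
      rw [ih (fun x hx => hw x (by simp [hx])) rest acc (g ++ [t])]
      simp

theorem pvStep_split (xs : List String) :
    ∀ (acc : List (List String)) (g : List String),
      List.foldl pvStep (acc ++ [g]) xs = acc ++ List.foldl pvStep [g] xs := by
  induction xs with
  | nil => intro acc g; simp
  | cons x xs' ih =>
      intro acc g
      cases hx : PySem.Str.isIn "I_" x with
      | true =>
          have h2 : pvStep [g] x = [g ++ [x]] := by
            have := pvStep_pos [] g x hx; simpa using this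
          simp only [List.foldl_cons, pvStep_pos acc g x hx, h2, ih]
      | false =>
          simp only [List.foldl_cons, pvStep_neg _ x hx]
          rw [ih (acc ++ [g]) [x], ih [g] [x], List.append_assoc]

theorem pvAlt_eq_grp : ∀ (n : Nat) (xs : List String), xs.length ≤ n →
    List.foldl pvStep [] xs = pvGrp xs := by
  intro n
  induction n with
  | zero =>
      intro xs h
      have : xs = [] := List.eq_nil_of_length_eq_zero (by omega)
      subst this; rw [pvGrp]; rfl
  | succ n ih =>
      intro xs h
      match xs with
      | [] => rw [pvGrp]; rfl
      | t :: rest =>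
          have hsplit : rest = rest.takeWhile (PySem.Str.isIn "I_")
              ++ rest.dropWhile (PySem.Str.isIn "I_") :=
            (List.takeWhile_append_dropWhile).symm
          have hw : ∀ x ∈ rest.takeWhile (PySem.Str.isIn "I_"),
              PySem.Str.isIn "I_" x = true := fun x hx => List.mem_takeWhile_imp hx
          rw [List.foldl_cons, pvStep_nil]
          conv_lhs => rw [hsplit]
          have hrun := pvStep_run (rest.takeWhile (PySem.Str.isIn "I_")) hw
            (rest.dropWhile (PySem.Str.isIn "I_")) [] [t]
          simp only [List.nil_append, List.singleton_append] at hrun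
          rw [hrun, pvGrp]
          cases hdw : rest.dropWhile (PySem.Str.isIn "I_") with
          | nil => rw [List.foldl_nil, pvGrp]
          | cons r rest'' =>
              have hr : PySem.Str.isIn "I_" r = false :=
                pv_dropWhile_head_false (PySem.Str.isIn "I_") rest r rest'' hdw
              rw [List.foldl_cons, pvStep_neg _ r hr,
                  pvStep_split rest'' [t :: rest.takeWhile (PySem.Str.isIn "I_")] [r]]
              have hlen : (r :: rest'').length ≤ n := by
                have h1 : (rest.dropWhile (PySem.Str.isIn "I_")).length ≤ rest.length :=
                  List.length_dropWhile_le _ rest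
                rw [hdw] at h1
                simp only [List.length_cons] at h h1 ⊢
                omega
              have hback : List.foldl pvStep [[r]] rest'' = List.foldl pvStep [] (r :: rest'') := by
                rw [List.foldl_cons, pvStep_nil]
              rw [hback, ih (r :: rest'') hlen, List.singleton_append]

-- ===== VERDICT (by name: the statement is the Claim_ definition above) =====
theorem regroupe_mots_composes_py_spec : Claim_equal_regroupe_mots_composes_py := by
  intro tags _
  unfold Spec_regroupe_mots_composes_py regroupe_mots_composes_py regroupe_mots_composes_py_alt
  rw [pvOuterA_eq]
  simp only [List.nil_append]
  rw [← pvAlt_eq_grp tags.length tags le_rfl]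
  rfl
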